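-- pv_equiv track=rewrite | github.com/edu-luc-cs-leo/comp-170-su-2025-week-05-ECOcoder23 | wee05.py | letters_only
-- ===== SOURCE A (Python) =====
-- def letters_only(string: str) -> str:
-- # Creates an empty string named "result"
--    result = ""
-- # Creates two ranges with ASCII values of alphabetical characters
--    letter_range_1 = range(65, 91)
--    letter_range_2 = range(97, 123)
--    i = 0
--    while i < len(string):
-- # If character in string has ASCII value in either range, it is concatenated to "result"
--      if ord(string[i]) in letter_range_1 or ord(string[i]) in letter_range_2:
--        result += string[i]
-- # If character not in either range, nothing is concatenated
--      else:
--        result += ""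
-- # Moves on to character number n + 1 in string
--      i += 1
--    return result
-- ===== SOURCE B (Python) =====
-- import re
--
-- def letters_only(string: str) -> str:
--     return re.sub(r'[^A-Za-z]', '', string)
-- ===== Notes on version B (the rewrite author's own statement) =====
-- stated objective: idiomatic
-- what changed: Replaced the index-driven while loop with repeated string concatenation by a single regex substitution that deletes every character outside the two ASCII letter ranges.
import Mathlib
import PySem

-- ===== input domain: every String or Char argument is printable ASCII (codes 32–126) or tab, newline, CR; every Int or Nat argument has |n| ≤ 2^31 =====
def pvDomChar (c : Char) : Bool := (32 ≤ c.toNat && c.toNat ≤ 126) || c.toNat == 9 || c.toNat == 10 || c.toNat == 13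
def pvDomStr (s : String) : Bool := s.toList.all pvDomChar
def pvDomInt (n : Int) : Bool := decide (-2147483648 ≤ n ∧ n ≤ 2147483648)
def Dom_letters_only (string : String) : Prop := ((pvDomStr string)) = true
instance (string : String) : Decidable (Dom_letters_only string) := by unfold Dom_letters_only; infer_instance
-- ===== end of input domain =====

-- B changes: a single regex substitution deleting non-ASCII-letter characters replaces the
-- index-driven while loop that concatenates character by character (idiomatic).

-- ===== PORT A =====
-- the while loop over index i, accumulating into result; terminates since len - i decreases
def lettersOnlyLoop (cs : List Char) (i : Nat) (result : List Char) : List Char :=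
  if h : i < cs.length then
    let c := cs[i]
    if (65 ≤ c.toNat ∧ c.toNat < 91) ∨ (97 ≤ c.toNat ∧ c.toNat < 123) then
      lettersOnlyLoop cs (i + 1) (result ++ [c])
    else
      lettersOnlyLoop cs (i + 1) (result ++ [])
  else result
termination_by cs.length - i

def letters_only (string : String) : String :=
  String.mk (lettersOnlyLoop string.toList 0 [])

-- ===== PORT B =====
-- re.sub(r'[^A-Za-z]', '', s): keep exactly the characters inside the two letter ranges
def isAsciiLetterB (c : Char) : Bool :=
  (65 ≤ c.toNat && c.toNat ≤ 90) || (97 ≤ c.toNat && c.toNat ≤ 122)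

def letters_only_alt (string : String) : String :=
  String.mk (string.toList.filter isAsciiLetterB)

-- ===== PRECONDITION & SPEC =====
def Spec_letters_only (string : String) (out : String) : Prop := out = letters_only_alt string
instance (string : String) (out : String) : Decidable (Spec_letters_only string out) := by unfold Spec_letters_only; infer_instance

-- ===== CLAIM =====
def Claim_equal_letters_only : Prop := ∀ (string : String), Dom_letters_only string → Spec_letters_only string (letters_only string)

-- ===== LEMMAS AND PROOFS =====
theorem lettersOnlyLoop_eq (cs : List Char) (i : Nat) (result : List Char) :
    lettersOnlyLoop cs i result = result ++ (cs.drop i).filter isAsciiLetterB := by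
  fun_induction lettersOnlyLoop cs i result with
  | case1 i result h c hc ih =>
    have hc' : 65 ≤ (cs[i]'h).toNat ∧ (cs[i]'h).toNat < 91 ∨
        97 ≤ (cs[i]'h).toNat ∧ (cs[i]'h).toNat < 123 := hc
    have hb : isAsciiLetterB (cs[i]'h) = true := by
      simp only [isAsciiLetterB, Bool.or_eq_true, Bool.and_eq_true, decide_eq_true_eq]
      omega
    rw [ih, List.drop_eq_getElem_cons h, List.filter_cons, hb]
    simp [c]
  | case2 i result h c hc ih =>
    have hc' : ¬(65 ≤ (cs[i]'h).toNat ∧ (cs[i]'h).toNat < 91 ∨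
        97 ≤ (cs[i]'h).toNat ∧ (cs[i]'h).toNat < 123) := hc
    have hb : isAsciiLetterB (cs[i]'h) = false := by
      simp only [isAsciiLetterB, Bool.or_eq_false_iff, Bool.and_eq_false_iff,
        decide_eq_false_iff_not]
      omega
    rw [ih, List.drop_eq_getElem_cons h, List.filter_cons, hb]
    simp
  | case3 i result h =>
    simp [List.drop_of_length_le (Nat.le_of_not_lt h)]

-- ===== VERDICT =====
theorem letters_only_spec : Claim_equal_letters_only := by
  intro string _
  unfold Spec_letters_only letters_only letters_only_alt
  rw [lettersOnlyLoop_eq]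
  simp
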